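-- pv_equiv track=rewrite | github.com/yurim0628/algorithm | 프로그래머스/3/64064. 불량 사용자/불량 사용자.py | solution
-- ===== SOURCE A (Python) =====
-- from itertools import product
--
-- def solution(user_id, banned_id):
--     answer = set()
--     banned_count = {}
--
--
--     for banned in banned_id:
--         if banned not in banned_count:
--             banned_count[banned] = []
--         else:
--             del banned_count[banned]
--
--     if not banned_count:
--         return 1
--
--     for banned in banned_id:
--         for user in user_id:
--             if len(banned) != len(user):
--                 continue
--             flag = True
--             for b, u in zip(banned, user):
--                 if b != '*':
--                     if b != u:
--                         flag = False
--                         break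
--             if flag:
--                 if banned in banned_count:
--                     banned_count[banned].append(user)
--
--
--     result = product(*banned_count.values())
--     unique_combinations = set()  # 중복된 조합을 제거하기 위한 세트
--     for combination in result:
--         if len(set(combination)) == len(combination):  # 중복된 조합인지 확인
--             unique_combinations.add(combination)
--
--     for combination in unique_combinations:
--         combination = sorted(combination)
--         answer.add(tuple(combination))
--
--
--     return len(answer)
-- ===== SOURCE B (Python) =====
-- def solution(user_id, banned_id):
--     # Parity toggle over banned patterns (same preprocessing as A: a pattern
--     # that appears an even number of times cancels out).
--     patterns = {}
--     for b in banned_id: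
--         if b in patterns:
--             del patterns[b]
--         else:
--             patterns[b] = True
--     if not patterns:
--         return 1
--
--     def matches(p, u):
--         return len(p) == len(u) and all(pc == '*' or pc == uc for pc, uc in zip(p, u))
--
--     lists = [[u for u in user_id if matches(p, u)] for p in patterns]
--
--     results = set()
--
--     def dfs(i, used, chosen):
--         if i == len(lists):
--             results.add(tuple(sorted(chosen)))
--             return
--         for u in lists[i]:
--             if u not in used:
--                 used.add(u)
--                 chosen.append(u)
--                 dfs(i + 1, used, chosen)
--                 chosen.pop()
--                 used.remove(u)
--
--     dfs(0, set(), [])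
--     return len(results)
-- ===== Notes on version B (the rewrite author's own statement) =====
-- stated objective: alternative
-- what changed: Replaces the itertools.product over all per-pattern candidate lists plus distinctness filter and sorted-tuple dedupe by a pruned recursive backtracking (DFS) that assigns one unused matching user per surviving pattern and inserts the sorted assignment into a result set; matching lists are built once per surviving pattern with a helper predicate instead of re-scanning every banned_id occurrence.
import Mathlib
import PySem

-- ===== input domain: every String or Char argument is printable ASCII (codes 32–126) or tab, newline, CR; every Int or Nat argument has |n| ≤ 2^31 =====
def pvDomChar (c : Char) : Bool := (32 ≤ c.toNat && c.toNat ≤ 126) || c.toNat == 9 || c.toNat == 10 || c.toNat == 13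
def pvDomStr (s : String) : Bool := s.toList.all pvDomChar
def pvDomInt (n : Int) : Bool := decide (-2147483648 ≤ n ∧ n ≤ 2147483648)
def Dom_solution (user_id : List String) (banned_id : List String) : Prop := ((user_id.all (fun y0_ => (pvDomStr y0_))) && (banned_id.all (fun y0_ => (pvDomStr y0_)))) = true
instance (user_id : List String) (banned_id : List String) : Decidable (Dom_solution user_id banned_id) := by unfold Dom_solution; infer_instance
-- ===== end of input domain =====

-- B replaces A's full Cartesian product + distinctness filter + sorted-tuple dedupe by a
-- pruned backtracking search over the surviving patterns (objective: alternative algorithm).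

-- ===== PORT A =====
-- the inner char loop of A ('for b, u in zip(...): if b != '*': if b != u: flag = False; break')
def aFlag : List (Char × Char) → Bool
  | [] => true
  | (b, u) :: rest => if b ≠ '*' then (if b ≠ u then false else aFlag rest) else aFlag rest

-- first loop of A: the parity toggle building banned_count
def aToggle (banned_id : List String) : PySem.Dict String (List String) :=
  banned_id.foldl
    (fun d banned => if d.contains banned = false then d.insert banned [] else d.erase banned)
    PySem.Dict.empty

-- inner 'for user in user_id' body of A's second loop
def aInner (user_id : List String) (banned : String) (d : PySem.Dict String (List String)) :
    PySem.Dict String (List String) :=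
  user_id.foldl
    (fun d user =>
      if PySem.Str.len banned ≠ PySem.Str.len user then d
      else if aFlag (banned.toList.zip user.toList) then
        (if d.contains banned then d.modify banned [] (fun v => v ++ [user]) else d)
      else d)
    d

-- second loop of A: fill the matching lists
def aFill (user_id : List String) (banned_id : List String)
    (d : PySem.Dict String (List String)) : PySem.Dict String (List String) :=
  banned_id.foldl (fun d banned => aInner user_id banned d) d

-- itertools.product(*lists) as lists, in product order
def aProd : List (List String) → List (List String)
  | [] => [[]]
  | l :: ls => l.flatMap (fun x => (aProd ls).map (fun c => x :: c))

def solution (user_id : List String) (banned_id : List String) : Int :=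
  let banned_count := aToggle banned_id
  if banned_count.size = 0 then 1
  else
    let banned_count := aFill user_id banned_id banned_count
    let result := aProd banned_count.values
    let unique_combinations : PySem.Set (List String) :=
      result.foldl
        (fun s c => if (PySem.Set.ofList c).length = c.length then PySem.Set.add s c else s)
        PySem.Set.empty
    let answer : PySem.Set (List String) :=
      unique_combinations.foldl
        (fun s c => PySem.Set.add s (PySem.List.sorted c (fun x => x) false))
        PySem.Set.empty
    (answer.length : Int)

-- ===== PORT B =====
def bMatches (p u : String) : Bool :=
  PySem.Str.len p == PySem.Str.len u
    && (p.toList.zip u.toList).all (fun cu => cu.1 == '*' || cu.1 == cu.2)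

def bDfs : List (List String) → PySem.Set String → List String → PySem.Set (List String) →
    PySem.Set (List String)
  | [], _, chosen, res => PySem.Set.add res (PySem.List.sorted chosen (fun x => x) false)
  | l :: ls, used, chosen, res =>
      l.foldl
        (fun res u =>
          if PySem.Set.contains used u then res
          else bDfs ls (PySem.Set.add used u) (chosen ++ [u]) res)
        res

def solution_alt (user_id : List String) (banned_id : List String) : Int :=
  let patterns : PySem.Dict String Bool :=
    banned_id.foldl
      (fun d p => if d.contains p then d.erase p else d.insert p true)
      PySem.Dict.empty
  if patterns.size = 0 then 1
  else
    let lists := patterns.keys.map (fun p => user_id.filter (fun x => bMatches p x))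
    ((bDfs lists PySem.Set.empty [] PySem.Set.empty).length : Int)

-- ===== PRECONDITION & SPEC =====
def Spec_solution (user_id : List String) (banned_id : List String) (out : Int) : Prop := out = solution_alt user_id banned_id
instance (user_id : List String) (banned_id : List String) (out : Int) : Decidable (Spec_solution user_id banned_id out) := by unfold Spec_solution; infer_instance

-- ===== CLAIM (what is proved, stated in full; the proofs are below) =====
def Claim_equal_solution : Prop := ∀ (user_id : List String) (banned_id : List String), Dom_solution user_id banned_id → Spec_solution user_id banned_id (solution user_id banned_id)

-- ===== LEMMAS AND PROOFS =====

-- contains only looks at the keys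
theorem dict_contains_eq_keys {ν : Type} (d : PySem.Dict String ν) (k : String) :
    d.contains k = d.keys.any (· == k) := by
  simp [PySem.Dict.contains, PySem.Dict.keys, List.any_map]; rfl

-- keys of erase, from the definition (items filtered)
theorem dict_keys_erase {ν : Type} (d : PySem.Dict String ν) (k : String) :
    (d.erase k).keys = d.keys.filter (fun x => !(x == k)) := by
  simp [PySem.Dict.erase, PySem.Dict.keys, List.filter_map]; rfl

-- every value of erase was a value before
theorem dict_values_erase_subset {ν : Type} (d : PySem.Dict String ν) (k : String) :
    ∀ v ∈ (d.erase k).values, v ∈ d.values := by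
  intro v hv
  simp only [PySem.Dict.erase, PySem.Dict.values, List.mem_map] at hv ⊢
  obtain ⟨p, hp, he⟩ := hv
  exact ⟨p, (List.mem_filter.1 hp).1, he⟩

theorem dict_values_insert_fresh {ν : Type} (d : PySem.Dict String ν) (k : String) (v : ν)
    (h : d.contains k = false) : (d.insert k v).values = d.values ++ [v] := by
  simp [PySem.Dict.insert, h, PySem.Dict.values]

-- get? hits a stored value
theorem dict_getD_mem_values (d : PySem.Dict String (List String)) (k : String)
    (h : d.contains k = true) : d.getD k [] ∈ d.values := by
  simp only [PySem.Dict.contains, List.any_eq_true] at h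
  have hs : (d.items.find? (fun p => p.1 == k)).isSome := by
    rw [List.find?_isSome]
    obtain ⟨p, hp, hk⟩ := h
    exact ⟨p, hp, hk⟩
  obtain ⟨p, hp⟩ := Option.isSome_iff_exists.1 hs
  have hmem := List.mem_of_find?_eq_some hp
  simp only [PySem.Dict.getD, PySem.Dict.get?, hp, Option.map_some, Option.getD_some,
    PySem.Dict.values, List.mem_map]
  exact ⟨p, hmem, rfl⟩

-- the two parity toggles walk in lock-step: equal key lists, with the invariants A needs
theorem toggle_inv (bs : List String) (d1 : PySem.Dict String (List String))
    (d2 : PySem.Dict String Bool) (hk : d1.keys = d2.keys) (hnd : d1.keys.Nodup)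
    (hv : ∀ v ∈ d1.values, v = ([] : List String)) :
    (bs.foldl (fun d banned => if d.contains banned = false then d.insert banned [] else d.erase banned) d1).keys
        = (bs.foldl (fun d p => if d.contains p then d.erase p else d.insert p true) d2).keys
    ∧ (bs.foldl (fun d banned => if d.contains banned = false then d.insert banned [] else d.erase banned) d1).keys.Nodup
    ∧ (∀ v ∈ (bs.foldl (fun d banned => if d.contains banned = false then d.insert banned [] else d.erase banned) d1).values, v = ([] : List String))
    ∧ (∀ p ∈ (bs.foldl (fun d banned => if d.contains banned = false then d.insert banned [] else d.erase banned) d1).keys, p ∈ d1.keys ∨ p ∈ bs) := by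
  induction bs generalizing d1 d2 with
  | nil => exact ⟨hk, hnd, hv, fun p hp => Or.inl hp⟩
  | cons b bs ih =>
    simp only [List.foldl_cons]
    have hcc : d1.contains b = d2.contains b := by
      rw [dict_contains_eq_keys, dict_contains_eq_keys, hk]
    by_cases hc : d1.contains b = false
    · have hc2 : d2.contains b = false := by rw [← hcc]; exact hc
      rw [if_pos hc, hc2]
      simp only [Bool.false_eq_true, if_false]
      have hbk : b ∉ d1.keys := by
        intro hb
        rw [← PySem.Dict.contains_iff_mem_keys] at hb
        rw [hb] at hc; simp at hc
      have hk1 : (d1.insert b []).keys = d1.keys ++ [b] :=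
        PySem.Dict.keys_insert_of_not_contains _ _ hc
      have hk2 : (d2.insert b true).keys = d2.keys ++ [b] :=
        PySem.Dict.keys_insert_of_not_contains _ _ (by rw [← hcc]; exact hc)
      obtain ⟨e1, e2, e3, e4⟩ := ih (d1.insert b []) (d2.insert b true)
        (by rw [hk1, hk2, hk])
        (by rw [hk1]; exact List.Nodup.append hnd (List.nodup_singleton b)
              (by simp [List.disjoint_singleton]; exact hbk))
        (by rw [dict_values_insert_fresh _ _ _ hc]; intro v hv'
            rcases List.mem_append.1 hv' with h | h
            · exact hv v h
            · simpa using h)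
      refine ⟨e1, e2, e3, fun p hp => ?_⟩
      rcases e4 p hp with h | h
      · rw [hk1] at h
        rcases List.mem_append.1 h with h | h
        · exact Or.inl h
        · simp at h; exact Or.inr (by simp [h])
      · exact Or.inr (List.mem_cons_of_mem _ h)
    · rw [if_neg hc]
      have hc' : d2.contains b = true := by rw [← hcc]; simpa using hc
      rw [hc', if_pos rfl]
      obtain ⟨e1, e2, e3, e4⟩ := ih (d1.erase b) (d2.erase b)
        (by rw [dict_keys_erase, dict_keys_erase, hk])
        (by rw [dict_keys_erase]; exact List.Nodup.filter _ hnd)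
        (fun v hv' => hv v (dict_values_erase_subset _ _ v hv'))
      refine ⟨e1, e2, e3, fun p hp => ?_⟩
      rcases e4 p hp with h | h
      · rw [dict_keys_erase] at h
        exact Or.inl (List.mem_of_mem_filter h)
      · exact Or.inr (List.mem_cons_of_mem _ h)

-- A's char loop is an 'all' over the zipped characters
theorem aFlag_eq_all (l : List (Char × Char)) :
    aFlag l = l.all (fun cu => cu.1 == '*' || cu.1 == cu.2) := by
  induction l with
  | nil => rfl
  | cons cu rest ih =>
    obtain ⟨b, u⟩ := cu
    by_cases hb : b = '*'
    · simp [aFlag, hb, ih]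
    · by_cases hu : b = u <;> simp [aFlag, hb, hu, ih]

theorem aInner_keys (us : List String) (b : String) (d : PySem.Dict String (List String)) :
    (aInner us b d).keys = d.keys := by
  induction us generalizing d with
  | nil => rfl
  | cons x us ih =>
    show (aInner us b _).keys = _
    rw [show (aInner us b _) = aInner us b (if PySem.Str.len b ≠ PySem.Str.len x then d
      else if aFlag (b.toList.zip x.toList) then
        (if d.contains b then d.modify b [] (fun v => v ++ [x]) else d) else d) from rfl]
    split_ifs with h1 h2 h3
    · exact ih d
    · rw [ih, PySem.Dict.keys_modify, PySem.Dict.keys_insert_of_contains _ _ h3]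
    · exact ih d
    · exact ih d

theorem aInner_getD (us : List String) (b q : String) (d : PySem.Dict String (List String)) :
    (aInner us b d).getD q [] =
      if q = b ∧ d.contains b = true then d.getD q [] ++ us.filter (fun x => bMatches b x)
      else d.getD q [] := by
  induction us generalizing d with
  | nil =>
    show d.getD q [] = _
    split_ifs with h
    · simp
    · rfl
  | cons x us ih =>
    have hstep : aInner (x :: us) b d = aInner us b (if PySem.Str.len b ≠ PySem.Str.len x then d
      else if aFlag (b.toList.zip x.toList) then
        (if d.contains b then d.modify b [] (fun v => v ++ [x]) else d) else d) := rfl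
    rw [hstep]
    by_cases hlen : PySem.Str.len b = PySem.Str.len x
    · have hlen' : b.length = x.length := by simpa [PySem.Str.len_eq] using hlen
      by_cases hfl : aFlag (b.toList.zip x.toList) = true
      · have hbm : bMatches b x = true := by
          rw [aFlag_eq_all] at hfl
          simp [bMatches, hlen', hfl]
        by_cases hc : d.contains b = true
        · rw [if_neg (by simp [hlen']), if_pos hfl, if_pos hc, ih]
          have hc' : (d.modify b [] (fun v => v ++ [x])).contains b = true := by
            rw [PySem.Dict.contains_modify]; simp
          have hgd := fun r => PySem.Dict.getD_modify d b r ([] : List String) (fun v => v ++ [x])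
          simp only [hc', hc, and_true]
          by_cases hq : q = b
          · subst hq
            rw [if_pos rfl, if_pos rfl, hgd, if_pos rfl]
            simp [List.filter_cons, hbm]
          · rw [if_neg hq, if_neg hq, hgd, if_neg hq]
        · rw [if_neg (by simp [hlen']), if_pos hfl, if_neg hc, ih]
          rw [if_neg (by rintro ⟨_, h⟩; exact hc h), if_neg (by rintro ⟨_, h⟩; exact hc h)]
      · have hbm : bMatches b x = false := by
          cases h : (b.toList.zip x.toList).all (fun cu => cu.1 == '*' || cu.1 == cu.2) with
          | true => exact absurd (by rw [aFlag_eq_all]; exact h) hfl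
          | false => simp [bMatches, h]
        rw [if_neg (by simp [hlen']), if_neg hfl, ih]
        simp [List.filter_cons, hbm]
    · have hlen' : ¬ b.length = x.length := by simpa [PySem.Str.len_eq] using hlen
      have hbm : bMatches b x = false := by simp [bMatches, hlen']
      rw [if_pos (by simp [hlen']), ih]
      simp [List.filter_cons, hbm]

theorem aFill_keys (u bs : List String) (d : PySem.Dict String (List String)) :
    (aFill u bs d).keys = d.keys := by
  induction bs generalizing d with
  | nil => rfl
  | cons b bs ih =>
    show (aFill u bs (aInner u b d)).keys = _
    rw [ih, aInner_keys]

theorem aFill_mem (u bs : List String) (d : PySem.Dict String (List String)) (q x : String) :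
    x ∈ (aFill u bs d).getD q [] ↔
      x ∈ d.getD q [] ∨ (q ∈ bs ∧ d.contains q = true ∧ x ∈ u ∧ bMatches q x = true) := by
  induction bs generalizing d with
  | nil => simp [aFill]
  | cons b bs ih =>
    show x ∈ (aFill u bs (aInner u b d)).getD q [] ↔ _
    rw [ih]
    have hcon : ∀ r, (aInner u b d).contains r = d.contains r := by
      intro r
      rw [dict_contains_eq_keys, dict_contains_eq_keys, aInner_keys]
    rw [aInner_getD, hcon]
    constructor
    · rintro (h | ⟨hqb, hcq, hxu, hbm⟩)
      · split_ifs at h with hq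
        · rcases List.mem_append.1 h with h | h
          · exact Or.inl h
          · obtain ⟨hxu, hbm⟩ := List.mem_filter.1 h
            exact Or.inr ⟨by rw [hq.1]; exact List.mem_cons_self, hq.1 ▸ hq.2, hxu, hq.1 ▸ hbm⟩
        · exact Or.inl h
      · exact Or.inr ⟨List.mem_cons_of_mem _ hqb, hcq, hxu, hbm⟩
    · rintro (h | ⟨hqb, hcq, hxu, hbm⟩)
      · split_ifs with hq
        · exact Or.inl (List.mem_append.2 (Or.inl h))
        · exact Or.inl h
      · rcases List.mem_cons.1 hqb with rfl | hqb
        · split_ifs with hq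
          · exact Or.inl (List.mem_append.2 (Or.inr (List.mem_filter.2 ⟨hxu, hbm⟩)))
          · exact absurd ⟨rfl, hcq⟩ hq
        · exact Or.inr ⟨hqb, hcq, hxu, hbm⟩

theorem mem_aProd (Ls : List (List String)) (x : List String) :
    x ∈ aProd Ls ↔ List.Forall₂ (fun a l => a ∈ l) x Ls := by
  induction Ls generalizing x with
  | nil => simp [aProd, List.forall₂_nil_right_iff]
  | cons l ls ih =>
    simp only [aProd, List.mem_flatMap, List.mem_map, List.forall₂_cons_right_iff]
    constructor
    · rintro ⟨a, ha, c, hc, rfl⟩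
      exact ⟨a, c, ha, (ih c).1 hc, rfl⟩
    · rintro ⟨a, c, ha, hc, rfl⟩
      exact ⟨a, ha, c, (ih c).2 hc, rfl⟩

theorem ofList_sublist (c : List String) : (PySem.Set.ofList c).Sublist c := by
  induction c using List.reverseRecOn with
  | nil => simp
  | append_singleton c x ih =>
    rw [PySem.Set.ofList_append_singleton, PySem.Set.add_eq_ite]
    split_ifs with h
    · exact ih.trans (List.sublist_append_left c [x])
    · exact List.Sublist.append ih (List.Sublist.refl [x])

theorem ofList_length_iff (c : List String) :
    (PySem.Set.ofList c).length = c.length ↔ c.Nodup := by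
  constructor
  · intro h
    have := List.Sublist.eq_of_length (ofList_sublist c) h
    rw [← this]
    exact PySem.Set.nodup_ofList c
  · intro h
    rw [PySem.Set.ofList_eq_self_of_nodup c h]

theorem bDfs_nodup (Ls : List (List String)) (used : PySem.Set String) (chosen : List String)
    (res : PySem.Set (List String)) (h : res.Nodup) : (bDfs Ls used chosen res).Nodup := by
  induction Ls generalizing used chosen res with
  | nil => exact PySem.Set.nodup_add _ _ h
  | cons l ls ih =>
    show (l.foldl _ res).Nodup
    have aux : ∀ (l' : List String) (res : PySem.Set (List String)), res.Nodup →
        (l'.foldl (fun res u => if PySem.Set.contains used u then res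
          else bDfs ls (PySem.Set.add used u) (chosen ++ [u]) res) res).Nodup := by
      intro l'
      induction l' with
      | nil => intro res h; exact h
      | cons u l' ihl =>
        intro res h
        simp only [List.foldl_cons]
        apply ihl
        split_ifs with hcu
        · exact h
        · exact ih _ _ _ h
    exact aux l res h

theorem mem_bDfs (Ls : List (List String)) (used : PySem.Set String) (chosen : List String)
    (res : PySem.Set (List String)) (y : List String) :
    y ∈ bDfs Ls used chosen res ↔
      y ∈ res ∨ ∃ c, List.Forall₂ (fun a l => a ∈ l) c Ls ∧ (c.Nodup ∧ ∀ x ∈ c, x ∉ used)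
        ∧ y = PySem.List.sorted (chosen ++ c) (fun x => x) false := by
  induction Ls generalizing used chosen res with
  | nil =>
    simp only [bDfs, PySem.Set.mem_add, List.forall₂_nil_right_iff]
    constructor
    · rintro (h | rfl)
      · exact Or.inl h
      · exact Or.inr ⟨[], rfl, ⟨List.nodup_nil, by simp⟩, by simp⟩
    · rintro (h | ⟨c, rfl, _, rfl⟩)
      · exact Or.inl h
      · simp
  | cons l ls ih =>
    show y ∈ l.foldl _ res ↔ _
    have aux : ∀ (l' : List String) (res : PySem.Set (List String)),
        y ∈ l'.foldl (fun res u => if PySem.Set.contains used u then res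
            else bDfs ls (PySem.Set.add used u) (chosen ++ [u]) res) res ↔
          y ∈ res ∨ ∃ u ∈ l', u ∉ used ∧ ∃ c', List.Forall₂ (fun a l => a ∈ l) c' ls ∧
            (c'.Nodup ∧ ∀ z ∈ c', z ∉ PySem.Set.add used u) ∧
            y = PySem.List.sorted (chosen ++ u :: c') (fun x => x) false := by
      intro l'
      induction l' with
      | nil => intro res; simp
      | cons u l' ihl =>
        intro res
        simp only [List.foldl_cons]
        by_cases hcu : PySem.Set.contains used u = true
        · rw [if_pos hcu, ihl]
          have hu : u ∈ used := by
            have := PySem.Set.contains_iff (s := used) (x := u)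
            exact this.1 hcu
          constructor
          · rintro (h | ⟨v, hv, hvn, rest⟩)
            · exact Or.inl h
            · exact Or.inr ⟨v, List.mem_cons_of_mem _ hv, hvn, rest⟩
          · rintro (h | ⟨v, hv, hvn, rest⟩)
            · exact Or.inl h
            · rcases List.mem_cons.1 hv with rfl | hv
              · exact absurd hu hvn
              · exact Or.inr ⟨v, hv, hvn, rest⟩
        · rw [if_neg hcu, ihl, ih]
          have hu : u ∉ used := by
            intro h
            exact hcu ((PySem.Set.contains_iff (s := used) (x := u)).2 h)
          have hsor : ∀ c' : List String,
              PySem.List.sorted ((chosen ++ [u]) ++ c') (fun x => x) false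
                = PySem.List.sorted (chosen ++ u :: c') (fun x => x) false := by
            intro c'; rw [List.append_assoc]; rfl
          constructor
          · rintro ((h | ⟨c', hf, hnd, rfl⟩) | ⟨v, hv, hvn, rest⟩)
            · exact Or.inl h
            · exact Or.inr ⟨u, List.mem_cons_self, hu, c', hf, hnd, (hsor c')⟩
            · exact Or.inr ⟨v, List.mem_cons_of_mem _ hv, hvn, rest⟩
          · rintro (h | ⟨v, hv, hvn, rest⟩)
            · exact Or.inl (Or.inl h)
            · rcases List.mem_cons.1 hv with rfl | hv
              · obtain ⟨c', hf, hnd, rfl⟩ := rest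
                exact Or.inl (Or.inr ⟨c', hf, hnd, (hsor c').symm⟩)
              · exact Or.inr ⟨v, hv, hvn, rest⟩
    rw [aux l res]
    constructor
    · rintro (h | ⟨u, hul, hu, c', hf, ⟨hnd, hnu⟩, rfl⟩)
      · exact Or.inl h
      · refine Or.inr ⟨u :: c', List.forall₂_cons.2 ⟨hul, hf⟩, ⟨?_, ?_⟩, rfl⟩
        · exact List.nodup_cons.2 ⟨fun hc => (hnu u hc) (by
            rw [PySem.Set.mem_add]; exact Or.inr rfl), hnd⟩
        · intro z hz
          rcases List.mem_cons.1 hz with rfl | hz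
          · exact hu
          · intro hzin
            exact hnu z hz (by rw [PySem.Set.mem_add]; exact Or.inl hzin)
    · rintro (h | ⟨c, hf, ⟨hnd, hnu⟩, rfl⟩)
      · exact Or.inl h
      · obtain ⟨u, c', hul, hf', rfl⟩ := List.forall₂_cons_right_iff.1 hf
        refine Or.inr ⟨u, hul, hnu u List.mem_cons_self, c', hf',
          ⟨(List.nodup_cons.1 hnd).2, ?_⟩, rfl⟩
        intro z hz hzin
        rcases (PySem.Set.mem_add _ _ _).1 hzin with h' | rfl
        · exact hnu z (List.mem_cons_of_mem _ hz) h'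
        · exact (List.nodup_cons.1 hnd).1 hz

theorem forall₂_mem_congr (As Bs : List (List String))
    (h : List.Forall₂ (fun a b => ∀ x, x ∈ a ↔ x ∈ b) As Bs) (c : List String) :
    List.Forall₂ (fun a l => a ∈ l) c As ↔ List.Forall₂ (fun a l => a ∈ l) c Bs := by
  induction h generalizing c with
  | nil => rfl
  | cons hab hrest ih =>
    cases c with
    | nil => simp [List.forall₂_nil_left_iff]
    | cons x c => simp [List.forall₂_cons, hab x, ih c]

theorem solution_eq (u b : List String) : solution u b = solution_alt u b := by
  obtain ⟨hk, hnd, hval, hsub⟩ := toggle_inv b PySem.Dict.empty PySem.Dict.empty rfl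
    (by simp [PySem.Dict.keys, PySem.Dict.empty]) (by simp [PySem.Dict.values, PySem.Dict.empty])
  set T1 : PySem.Dict String (List String) :=
    b.foldl (fun d banned => if d.contains banned = false then d.insert banned [] else d.erase banned) PySem.Dict.empty with hT1
  set T2 : PySem.Dict String Bool :=
    b.foldl (fun d p => if d.contains p then d.erase p else d.insert p true) PySem.Dict.empty with hT2
  have hT1' : aToggle b = T1 := rfl
  have hsz : T1.size = T2.size := by
    have h1 : T1.size = T1.keys.length := by simp [PySem.Dict.size, PySem.Dict.keys]
    have h2 : T2.size = T2.keys.length := by simp [PySem.Dict.size, PySem.Dict.keys]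
    rw [h1, h2, hk]
  simp only [solution, solution_alt, hT1', ← hT2]
  by_cases hz : T1.size = 0
  · rw [if_pos hz, if_pos (hsz ▸ hz)]
  · rw [if_neg hz, if_neg (hsz ▸ hz)]
    -- the two candidate lists, pointwise equal as sets
    have hd1k : (aFill u b T1).keys = T1.keys := aFill_keys u b T1
    have hLsA : (aFill u b T1).values
        = T1.keys.map (fun k => (aFill u b T1).getD k []) := by
      rw [← hd1k]
      exact PySem.Dict.values_eq_map_keys _ (hd1k ▸ hnd) []
    have hpoint : ∀ k ∈ T1.keys, ∀ x,
        x ∈ (aFill u b T1).getD k [] ↔ x ∈ u.filter (fun x => bMatches k x) := by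
      intro k hkmem x
      have hcon : T1.contains k = true := (PySem.Dict.contains_iff_mem_keys T1 k).2 hkmem
      have hkb : k ∈ b := by
        rcases hsub k hkmem with h | h
        · simp [PySem.Dict.keys, PySem.Dict.empty] at h
        · exact h
      have hT1getD : T1.getD k [] = [] := hval _ (dict_getD_mem_values T1 k hcon)
      rw [aFill_mem, hT1getD, List.mem_filter]
      simp [hkb, hcon]
    have hFF : List.Forall₂ (fun a c => ∀ x, x ∈ a ↔ x ∈ c) ((aFill u b T1).values)
        (T2.keys.map (fun p => u.filter (fun x => bMatches p x))) := by
      rw [hLsA, ← hk, List.forall₂_map_left_iff, List.forall₂_map_right_iff, List.forall₂_same]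
      exact hpoint
    -- membership characterisation of A's answer set
    have hmemA : ∀ y, y ∈ ((aProd (aFill u b T1).values).foldl
        (fun s c => if (PySem.Set.ofList c).length = c.length then PySem.Set.add s c else s)
        PySem.Set.empty).foldl
          (fun s c => PySem.Set.add s (PySem.List.sorted c (fun x => x) false)) PySem.Set.empty
        ↔ ∃ c, (List.Forall₂ (fun a l => a ∈ l) c ((aFill u b T1).values) ∧ c.Nodup)
            ∧ y = PySem.List.sorted c (fun x => x) false := by
      intro y
      simp only [PySem.Set.empty]
      rw [PySem.List.foldl_ite_eq_foldl_filter, ← PySem.Set.ofList_eq_foldl,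
        ← PySem.Set.update_map_eq_foldl_add, PySem.Set.update_nil_left]
      rw [PySem.Set.mem_ofList]
      simp only [List.mem_map, PySem.Set.mem_ofList, List.mem_filter]
      constructor
      · rintro ⟨c, ⟨hc, hlen⟩, rfl⟩
        exact ⟨c, ⟨(mem_aProd _ _).1 hc, (ofList_length_iff c).1 (by simpa using hlen)⟩, rfl⟩
      · rintro ⟨c, ⟨hc, hnd'⟩, rfl⟩
        exact ⟨c, ⟨(mem_aProd _ _).2 hc, by simp [(ofList_length_iff c).2 hnd']⟩, rfl⟩
    have hmemB : ∀ y, y ∈ bDfs (T2.keys.map (fun p => u.filter (fun x => bMatches p x)))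
        PySem.Set.empty [] PySem.Set.empty
        ↔ ∃ c, (List.Forall₂ (fun a l => a ∈ l) c
            (T2.keys.map (fun p => u.filter (fun x => bMatches p x))) ∧ c.Nodup)
          ∧ y = PySem.List.sorted c (fun x => x) false := by
      intro y
      rw [mem_bDfs]
      simp only [PySem.Set.empty, List.not_mem_nil, false_or, List.nil_append]
      constructor
      · rintro ⟨c, hf, ⟨hnd', _⟩, rfl⟩
        exact ⟨c, ⟨hf, hnd'⟩, rfl⟩
      · rintro ⟨c, ⟨hf, hnd'⟩, rfl⟩
        exact ⟨c, hf, ⟨hnd', by simp⟩, rfl⟩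
    have hiff : ∀ y, y ∈ ((aProd (aFill u b T1).values).foldl
        (fun s c => if (PySem.Set.ofList c).length = c.length then PySem.Set.add s c else s)
        PySem.Set.empty).foldl
          (fun s c => PySem.Set.add s (PySem.List.sorted c (fun x => x) false)) PySem.Set.empty
        ↔ y ∈ bDfs (T2.keys.map (fun p => u.filter (fun x => bMatches p x)))
            PySem.Set.empty [] PySem.Set.empty := by
      intro y
      rw [hmemA, hmemB]
      constructor
      · rintro ⟨c, ⟨hc, hnd'⟩, rfl⟩
        exact ⟨c, ⟨(forall₂_mem_congr _ _ hFF c).1 hc, hnd'⟩, rfl⟩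
      · rintro ⟨c, ⟨hc, hnd'⟩, rfl⟩
        exact ⟨c, ⟨(forall₂_mem_congr _ _ hFF c).2 hc, hnd'⟩, rfl⟩
    have hndA : (((aProd (aFill u b T1).values).foldl
        (fun s c => if (PySem.Set.ofList c).length = c.length then PySem.Set.add s c else s)
        PySem.Set.empty).foldl
          (fun s c => PySem.Set.add s (PySem.List.sorted c (fun x => x) false)) PySem.Set.empty).Nodup := by
      simp only [PySem.Set.empty]
      rw [PySem.List.foldl_ite_eq_foldl_filter, ← PySem.Set.ofList_eq_foldl,
        ← PySem.Set.update_map_eq_foldl_add, PySem.Set.update_nil_left]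
      exact PySem.Set.nodup_ofList _
    have hndB := bDfs_nodup (T2.keys.map (fun p => u.filter (fun x => bMatches p x)))
      PySem.Set.empty [] PySem.Set.empty List.nodup_nil
    have hperm := (List.perm_ext_iff_of_nodup hndA hndB).2 hiff
    rw [hperm.length_eq]

-- ===== VERDICT (by name: the statement is the Claim_ definition above) =====
theorem solution_spec : Claim_equal_solution := by
  intro u b _
  unfold Spec_solution
  exact solution_eq u b
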